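-- pv_equiv track=rewrite | github.com/patrickMalikTU/bachelors | bleuComparison/BLEUMultipleFileComparison.py | check_if_linenumbers_match
-- ===== SOURCE A (Python) =====
-- def check_if_linenumbers_match(lines):
--     length = -1
--     for line in lines:
--         if length == -1:
--             length = len(line)
--         else:
--             if length != len(line):
--                 return False
--     return True
-- ===== SOURCE B (Python) =====
-- def check_if_linenumbers_match(lines):
--     lengths = set(len(line) for line in lines)
--     return len(lengths) <= 1
-- ===== Notes on version B (the rewrite author's own statement) =====
-- stated objective: idiomatic
-- what changed: Replaces the -1-sentinel loop with early return by a single comprehension collecting all line lengths into a set and checking the set has at most one element.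
import Mathlib
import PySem

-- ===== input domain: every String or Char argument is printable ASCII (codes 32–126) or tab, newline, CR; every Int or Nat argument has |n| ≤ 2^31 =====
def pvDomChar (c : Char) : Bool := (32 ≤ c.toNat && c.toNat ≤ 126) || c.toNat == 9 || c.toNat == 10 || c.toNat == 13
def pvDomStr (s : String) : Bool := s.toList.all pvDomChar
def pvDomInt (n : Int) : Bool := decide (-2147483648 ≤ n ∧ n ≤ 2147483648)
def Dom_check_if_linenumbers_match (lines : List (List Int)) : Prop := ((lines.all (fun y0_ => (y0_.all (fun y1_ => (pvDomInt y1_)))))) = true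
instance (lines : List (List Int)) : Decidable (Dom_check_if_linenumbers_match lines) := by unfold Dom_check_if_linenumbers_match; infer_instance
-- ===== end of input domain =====

-- B replaces A's sentinel-based early-exit loop by collecting all line lengths into a set
-- and checking it has at most one element (idiomatic; same O(n) cost).


-- ===== PORT A =====
-- the for-loop with its early `return False` and the running `length` sentinel
def chkLoopA : List (List Int) → Int → Bool
  | [], _ => true
  | line :: ls, length =>
      if length == -1 then chkLoopA ls (line.length : Int)
      else if length != (line.length : Int) then false
      else chkLoopA ls length

def check_if_linenumbers_match (lines : List (List Int)) : Bool :=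
  chkLoopA lines (-1)

-- ===== PORT B =====
def check_if_linenumbers_match_alt (lines : List (List Int)) : Bool :=
  let lengths : PySem.Set Int := PySem.Set.ofList (lines.map (fun line => (line.length : Int)))
  decide (PySem.Set.len lengths ≤ 1)

-- ===== PRECONDITION & SPEC =====
def Spec_check_if_linenumbers_match (lines : List (List Int)) (out : Bool) : Prop := out = check_if_linenumbers_match_alt lines
instance (lines : List (List Int)) (out : Bool) : Decidable (Spec_check_if_linenumbers_match lines out) := by unfold Spec_check_if_linenumbers_match; infer_instance

-- ===== CLAIM (what is proved, stated in full; the proofs are below) =====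
def Claim_equal_check_if_linenumbers_match : Prop := ∀ (lines : List (List Int)), Dom_check_if_linenumbers_match lines → Spec_check_if_linenumbers_match lines (check_if_linenumbers_match lines)

-- ===== LEMMAS AND PROOFS =====

-- Set.add never shrinks, hence foldl add never shrinks
theorem len_foldl_add_ge (xs : List Int) (s : List Int) :
    s.length ≤ (xs.foldl PySem.Set.add s).length := by
  induction xs generalizing s with
  | nil => simp
  | cons x xs ih =>
      refine le_trans ?_ (ih (PySem.Set.add s x))
      simp only [PySem.Set.add]
      split <;> simp

-- the set seeded with a and fed xs is a singleton iff every element of xs equals a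
theorem foldl_add_singleton_iff (xs : List Int) (a : Int) :
    ((xs.foldl PySem.Set.add [a]).length ≤ 1) ↔ ∀ x ∈ xs, x = a := by
  induction xs with
  | nil => simp
  | cons x xs ih =>
      rw [List.foldl_cons]
      by_cases hx : x = a
      · subst hx
        have hadd : PySem.Set.add [x] x = [x] := by
          simp [PySem.Set.add, PySem.Set.contains]
        rw [hadd, ih]
        simp
      · have hadd : PySem.Set.add [a] x = [a, x] := by
          simp [PySem.Set.add, PySem.Set.contains, hx]
        rw [hadd]
        have hge := len_foldl_add_ge xs [a, x]
        simp only [List.length_cons, List.length_nil] at hge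
        refine iff_of_false (by omega) ?_
        intro h
        exact hx (h x (by simp))

-- A's loop, once seeded with a real length n ≥ 0, checks that all lengths equal n
theorem chkLoopA_eq (ls : List (List Int)) (n : Int) (hn : 0 ≤ n) :
    chkLoopA ls n = decide (∀ x ∈ ls, (x.length : Int) = n) := by
  induction ls generalizing n with
  | nil => simp [chkLoopA]
  | cons l ls ih =>
      have h1 : (n == -1) = false := by
        simp only [beq_eq_false_iff_ne, ne_eq]
        omega
      by_cases h2 : n = (l.length : Int)
      · subst h2
        have hb : (((l.length : Int)) != ((l.length : Int))) = false := by simp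
        simp only [chkLoopA, h1, Bool.false_eq_true, if_false, hb]
        rw [ih _ hn]
        simp only [decide_eq_decide, List.mem_cons, forall_eq_or_imp]
        simp
      · have hb : (n != (l.length : Int)) = true := by
          simpa [bne_iff_ne] using h2
        simp only [chkLoopA, h1, Bool.false_eq_true, if_false, hb, if_true]
        symm
        rw [decide_eq_false_iff_not]
        intro h
        exact h2 ((h l (by simp)).symm)

-- ===== VERDICT (by name: the statement is the Claim_ definition above) =====
theorem check_if_linenumbers_match_spec : Claim_equal_check_if_linenumbers_match := by
  intro lines _
  unfold Spec_check_if_linenumbers_match check_if_linenumbers_match check_if_linenumbers_match_alt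
  cases lines with
  | nil => rfl
  | cons l ls =>
      have hA : chkLoopA (l :: ls) (-1) = decide (∀ x ∈ ls, (x.length : Int) = (l.length : Int)) := by
        simp only [chkLoopA, beq_self_eq_true, if_true]
        exact chkLoopA_eq ls _ (by positivity)
      have hofl : PySem.Set.ofList ((l :: ls).map (fun line => (line.length : Int)))
          = (ls.map (fun line => (line.length : Int))).foldl PySem.Set.add [(l.length : Int)] := by
        simp [PySem.Set.ofList_eq_foldl, PySem.Set.add, PySem.Set.contains]
      rw [hA]
      simp only [hofl, PySem.Set.len, decide_eq_decide]
      constructor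
      · intro h
        have hone : ((ls.map (fun line => (line.length : Int))).foldl PySem.Set.add
            [(l.length : Int)]).length ≤ 1 := by
          rw [foldl_add_singleton_iff]
          intro x hx
          simp only [List.mem_map] at hx
          obtain ⟨line, hline, rfl⟩ := hx
          exact h line hline
        exact_mod_cast hone
      · intro h line hline
        have hone : ((ls.map (fun line => (line.length : Int))).foldl PySem.Set.add
            [(l.length : Int)]).length ≤ 1 := by exact_mod_cast h
        exact (foldl_add_singleton_iff _ _).mp hone _ (List.mem_map.mpr ⟨line, hline, rfl⟩)
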